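-- pv_equiv track=rewrite | github.com/FlorianBrnrd/elegans-trans-splicing | app/page_download_plots.py | convert_input
-- ===== SOURCE A (Python) =====
-- def convert_input(input_list, GENES, GENESNAME):
--     converted = []
--
--     for gene in input_list:
--
--         # CDS format
--         if gene in GENES:
--             converted.append(gene)
--         # Common name
--         elif gene in GENESNAME.values():
--             gene = [i for i, v in GENESNAME.items() if gene == v][0]
--             converted.append(gene)
--
--     return converted
-- ===== SOURCE B (Python) =====
-- def convert_input(input_list, GENES, GENESNAME):
--     # Build one lookup table: common name -> first CDS key, then CDS ids map to themselves
--     # (inserted last so CDS ids take precedence, matching the GENES-first dispatch).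
--     index = {}
--     for k, v in GENESNAME.items():
--         index.setdefault(v, k)
--     for g in GENES:
--         index[g] = g
--     return [index[g] for g in input_list if g in index]
-- ===== Notes on version B (the rewrite author's own statement) =====
-- stated objective: faster
-- what changed: B precomputes a single name->CDS lookup dict (setdefault for first-key-wins, then CDS ids override) and does one flat filtered pass over the input, instead of A's per-gene membership tests and a full values()/items() scan for every common name.
import Mathlib
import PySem

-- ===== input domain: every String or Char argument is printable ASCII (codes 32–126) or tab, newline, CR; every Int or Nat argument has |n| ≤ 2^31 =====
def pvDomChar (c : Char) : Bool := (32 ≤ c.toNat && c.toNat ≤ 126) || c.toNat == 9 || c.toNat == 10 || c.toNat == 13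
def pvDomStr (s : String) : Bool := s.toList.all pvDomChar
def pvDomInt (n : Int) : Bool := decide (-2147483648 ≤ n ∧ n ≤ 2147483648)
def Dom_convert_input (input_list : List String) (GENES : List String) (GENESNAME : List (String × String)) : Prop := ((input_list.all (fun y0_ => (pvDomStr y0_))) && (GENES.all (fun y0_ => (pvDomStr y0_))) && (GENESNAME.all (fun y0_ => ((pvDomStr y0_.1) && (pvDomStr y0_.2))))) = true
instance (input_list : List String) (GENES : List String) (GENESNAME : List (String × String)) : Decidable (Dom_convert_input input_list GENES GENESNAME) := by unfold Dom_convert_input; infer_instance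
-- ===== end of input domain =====

-- B replaces A's per-gene membership tests and values()/items() scans by one precomputed
-- name->CDS lookup dict and a single filtered pass (faster; return value only).

-- ===== PORT A =====
-- GENESNAME is a Python dict: PySem.Dict.ofList realises the dict the caller passes.
-- '[i for i, v in GENESNAME.items() if gene == v][0]' is ported as headD "" of that list;
-- the default is unreachable because the branch is guarded by 'gene in GENESNAME.values()'.
def convert_input (input_list : List String) (GENES : List String) (GENESNAME : List (String × String)) : List String :=
  let d := PySem.Dict.ofList GENESNAME
  input_list.foldl (fun converted gene =>
    if GENES.contains gene then converted ++ [gene]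
    else if d.values.contains gene then
      converted ++ [(((d.items.filter (fun p => gene == p.2)).map (·.1)).headD "")]
    else converted) []

-- ===== PORT B =====
def convert_input_alt (input_list : List String) (GENES : List String) (GENESNAME : List (String × String)) : List String :=
  let d := PySem.Dict.ofList GENESNAME
  let index1 := d.items.foldl (fun ix p => ix.setdefault p.2 p.1) PySem.Dict.empty
  let index := GENES.foldl (fun ix g => ix.insert g g) index1
  input_list.filterMap (fun g => index.get? g)

-- ===== PRECONDITION & SPEC =====
def Spec_convert_input (input_list : List String) (GENES : List String) (GENESNAME : List (String × String)) (out : List String) : Prop := out = convert_input_alt input_list GENES GENESNAME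
instance (input_list : List String) (GENES : List String) (GENESNAME : List (String × String)) (out : List String) : Decidable (Spec_convert_input input_list GENES GENESNAME out) := by unfold Spec_convert_input; infer_instance

-- ===== CLAIM (what is proved, stated in full; the proofs are below) =====
def Claim_equal_convert_input : Prop := ∀ (input_list : List String) (GENES : List String) (GENESNAME : List (String × String)), Dom_convert_input input_list GENES GENESNAME → Spec_convert_input input_list GENES GENESNAME (convert_input input_list GENES GENESNAME)

-- ===== LEMMAS AND PROOFS =====

def pvIndex (GENES : List String) (l : List (String × String)) : PySem.Dict String String :=
  GENES.foldl (fun ix g => ix.insert g g)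
    (l.foldl (fun ix p => ix.setdefault p.2 p.1) PySem.Dict.empty)

theorem get?_setdefault_of_ne (d : PySem.Dict String String) (k k' v : String) (h : k' ≠ k) :
    (d.setdefault k v).get? k' = d.get? k' := by
  rcases hc : d.contains k with _ | _
  · rw [PySem.Dict.setdefault_of_not_contains d v hc, PySem.Dict.get?_insert_of_ne d v h]
  · rw [PySem.Dict.setdefault_of_contains d v hc]

theorem sd_fold_get? (l : List (String × String)) (ix0 : PySem.Dict String String) (v : String) :
    (l.foldl (fun ix p => ix.setdefault p.2 p.1) ix0).get? v
      = (ix0.get? v).or ((l.find? (fun p => v == p.2)).map (·.1)) := by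
  induction l generalizing ix0 with
  | nil => simp
  | cons p l ih =>
    simp only [List.foldl_cons, ih]
    by_cases h : v = p.2
    · rw [h, PySem.Dict.get?_setdefault_self]
      rw [← h]
      cases hx : ix0.get? v <;> simp [List.find?_cons, h, hx]
    · rw [get?_setdefault_of_ne _ _ _ _ h]
      simp [List.find?_cons, h]

theorem ins_fold_not_mem (l : List String) (ix : PySem.Dict String String) (g : String)
    (h : g ∉ l) : (l.foldl (fun ix g => ix.insert g g) ix).get? g = ix.get? g := by
  induction l generalizing ix with
  | nil => simp
  | cons x l ih =>
    simp only [List.mem_cons, not_or] at h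
    simp only [List.foldl_cons, ih _ h.2, PySem.Dict.get?_insert_of_ne _ _ h.1]

theorem ins_fold_mem (l : List String) (ix : PySem.Dict String String) (g : String)
    (h : g ∈ l) : (l.foldl (fun ix g => ix.insert g g) ix).get? g = some g := by
  induction l generalizing ix with
  | nil => simp at h
  | cons x l ih =>
    by_cases hm : g ∈ l
    · simp only [List.foldl_cons, ih _ hm]
    · rcases List.mem_cons.mp h with h | h
      · subst h
        simp only [List.foldl_cons, ins_fold_not_mem l _ g hm, PySem.Dict.get?_insert_self]
      · exact absurd h hm

theorem branch_eq_find (l : List (String × String)) (v : String) :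
    (if (l.map (·.2)).contains v then [((l.filter (fun p => v == p.2)).map (·.1)).headD ""] else [])
      = ((l.find? (fun p => v == p.2)).map (·.1)).toList := by
  induction l with
  | nil => simp
  | cons p l ih =>
    by_cases h : v = p.2
    · simp [List.find?_cons, List.filter_cons, h]
    · have hb : (v == p.2) = false := by simp [h]
      simp only [List.map_cons, List.contains_cons, List.filter_cons, List.find?_cons, hb,
        Bool.false_or, cond_false]
      simpa using ih

theorem pointwise (GENES : List String) (l : List (String × String)) (g : String) :
    (if GENES.contains g then [g]
     else if (l.map (·.2)).contains g then [((l.filter (fun p => g == p.2)).map (·.1)).headD ""]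
     else [])
    = ((pvIndex GENES l).get? g).toList := by
  unfold pvIndex
  by_cases hg : g ∈ GENES
  · simp [hg, ins_fold_mem GENES _ g hg]
  · rw [ins_fold_not_mem GENES _ g hg, sd_fold_get?]
    simp only [PySem.Dict.get?_empty, Option.none_or]
    simpa [hg] using branch_eq_find l g

theorem main_aux (input_list GENES : List String) (l : List (String × String)) (acc : List String) :
    input_list.foldl (fun converted gene =>
      if GENES.contains gene then converted ++ [gene]
      else if (l.map (·.2)).contains gene then
        converted ++ [((l.filter (fun p => gene == p.2)).map (·.1)).headD ""]
      else converted) acc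
    = acc ++ input_list.filterMap (fun g => (pvIndex GENES l).get? g) := by
  induction input_list generalizing acc with
  | nil => simp
  | cons g rest ih =>
    have hstep :
        (if GENES.contains g then acc ++ [g]
         else if (l.map (·.2)).contains g then
           acc ++ [((l.filter (fun p => g == p.2)).map (·.1)).headD ""]
         else acc)
        = acc ++ ((pvIndex GENES l).get? g).toList := by
      rw [← pointwise GENES l g]; split_ifs <;> simp
    simp only [List.foldl_cons, List.filterMap_cons, hstep, ih]
    cases (pvIndex GENES l).get? g <;> simp

-- ===== VERDICT (by name: the statement is the Claim_ definition above) =====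
theorem convert_input_spec : Claim_equal_convert_input := by
  intro input_list GENES GENESNAME _
  unfold Spec_convert_input convert_input convert_input_alt
  have h := main_aux input_list GENES (PySem.Dict.ofList GENESNAME).items []
  simpa [PySem.Dict.values, pvIndex] using h
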